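-- pv_equiv track=rewrite | github.com/asaha02/cwl-to-nextflow | src/cwl_parser.py | _process_hints
-- ===== SOURCE A (Python) =====
-- from typing import Dict, List, Any, Optional, Union
--
-- def _process_hints(hints: List[Dict[str, Any]]) -> Dict[str, Any]:
--     """Process and categorize hints."""
--     processed_hints = {
--         "docker": [],
--         "resource": [],
--         "other": []
--     }
--
--     for hint in hints:
--         hint_class = hint.get("class", "").lower()
--
--         if "docker" in hint_class:
--             processed_hints["docker"].append(hint)
--         elif "resource" in hint_class:
--             processed_hints["resource"].append(hint)
--         else:
--             processed_hints["other"].append(hint)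
--
--     return processed_hints
-- ===== SOURCE B (Python) =====
-- def _process_hints(hints):
--     """Process and categorize hints (three-filter decomposition)."""
--     def cls(hint):
--         return hint.get("class", "").lower()
--     return {
--         "docker": [h for h in hints if "docker" in cls(h)],
--         "resource": [h for h in hints if "docker" not in cls(h) and "resource" in cls(h)],
--         "other": [h for h in hints if "docker" not in cls(h) and "resource" not in cls(h)],
--     }
-- ===== Notes on version B (the rewrite author's own statement) =====
-- stated objective: idiomatic
-- what changed: Replaces the single loop that appends each hint into one of three mutable buckets with three independent filter passes (list comprehensions), one per bucket, assembled into the result dict at once.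
import Mathlib
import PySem

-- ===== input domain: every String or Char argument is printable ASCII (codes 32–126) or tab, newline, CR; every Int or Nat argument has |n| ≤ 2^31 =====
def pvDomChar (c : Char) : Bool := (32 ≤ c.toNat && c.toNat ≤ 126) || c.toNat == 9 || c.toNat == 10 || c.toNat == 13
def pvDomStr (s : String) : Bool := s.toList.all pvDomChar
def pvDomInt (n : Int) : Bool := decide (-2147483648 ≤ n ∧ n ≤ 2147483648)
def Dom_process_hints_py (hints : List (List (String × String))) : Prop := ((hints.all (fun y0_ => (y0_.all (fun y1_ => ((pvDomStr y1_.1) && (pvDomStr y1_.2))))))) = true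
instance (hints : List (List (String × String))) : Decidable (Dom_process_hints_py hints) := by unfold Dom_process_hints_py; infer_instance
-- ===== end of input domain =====

-- B replaces A's single bucket-appending loop with three independent filter passes; objective: idiomatic.

-- ===== PORT A =====
-- hint.get("class", "").lower() : first-match association-list lookup (Python dict lookup), then lower
def pvGetClass (hint : List (String × String)) : String :=
  PySem.Str.lower (((hint.find? (fun p => p.1 == "class")).map Prod.snd).getD "")

def process_hints_py (hints : List (List (String × String))) : List (String × List (List (String × String))) :=
  let st := hints.foldl (fun (acc : List (List (String × String)) × List (List (String × String)) × List (List (String × String))) hint =>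
      let hint_class := pvGetClass hint
      if PySem.Str.isIn "docker" hint_class then (acc.1 ++ [hint], acc.2.1, acc.2.2)
      else if PySem.Str.isIn "resource" hint_class then (acc.1, acc.2.1 ++ [hint], acc.2.2)
      else (acc.1, acc.2.1, acc.2.2 ++ [hint])) ([], [], [])
  [("docker", st.1), ("resource", st.2.1), ("other", st.2.2)]

-- ===== PORT B =====
def process_hints_py_alt (hints : List (List (String × String))) : List (String × List (List (String × String))) :=
  [("docker",   hints.filter (fun h => PySem.Str.isIn "docker" (pvGetClass h))),
   ("resource", hints.filter (fun h => !PySem.Str.isIn "docker" (pvGetClass h) && PySem.Str.isIn "resource" (pvGetClass h))),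
   ("other",    hints.filter (fun h => !PySem.Str.isIn "docker" (pvGetClass h) && !PySem.Str.isIn "resource" (pvGetClass h)))]

-- ===== PRECONDITION & SPEC =====
def Spec_process_hints_py (hints : List (List (String × String))) (out : List (String × List (List (String × String)))) : Prop := out = process_hints_py_alt hints
instance (hints : List (List (String × String))) (out : List (String × List (List (String × String)))) : Decidable (Spec_process_hints_py hints out) := by unfold Spec_process_hints_py; infer_instance

-- ===== CLAIM (what is proved, stated in full; the proofs are below) =====
def Claim_equal_process_hints_py : Prop := ∀ (hints : List (List (String × String))), Dom_process_hints_py hints → Spec_process_hints_py hints (process_hints_py hints)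

-- ===== LEMMAS AND PROOFS =====
theorem pv_fold_inv (hints : List (List (String × String)))
    (d r o : List (List (String × String))) :
    hints.foldl (fun (acc : List (List (String × String)) × List (List (String × String)) × List (List (String × String))) hint =>
      let hint_class := pvGetClass hint
      if PySem.Str.isIn "docker" hint_class then (acc.1 ++ [hint], acc.2.1, acc.2.2)
      else if PySem.Str.isIn "resource" hint_class then (acc.1, acc.2.1 ++ [hint], acc.2.2)
      else (acc.1, acc.2.1, acc.2.2 ++ [hint])) (d, r, o)
    = (d ++ hints.filter (fun h => PySem.Str.isIn "docker" (pvGetClass h)),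
       r ++ hints.filter (fun h => !PySem.Str.isIn "docker" (pvGetClass h) && PySem.Str.isIn "resource" (pvGetClass h)),
       o ++ hints.filter (fun h => !PySem.Str.isIn "docker" (pvGetClass h) && !PySem.Str.isIn "resource" (pvGetClass h))) := by
  induction hints generalizing d r o with
  | nil => simp
  | cons h t ih =>
    simp only [List.foldl_cons, List.filter_cons]
    split_ifs with h1 h2 h3 h4 <;> rw [ih] <;> simp_all

-- ===== VERDICT (by name: the statement is the Claim_ definition above) =====
theorem process_hints_py_spec : Claim_equal_process_hints_py := by
  intro hints _
  show process_hints_py hints = process_hints_py_alt hints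
  rw [process_hints_py, process_hints_py_alt, pv_fold_inv hints [] [] []]
  simp
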